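-- pv_equiv track=rewrite | github.com/seungineer/Algorithm | SWEA/D3/20934. 방울 마술/방울 마술.py | find
-- ===== SOURCE A (Python) =====
-- def find(k, prev_lst):
--     new_lst = [0, 0, 0]
--     for i in range(3):
--         p = prev_lst[i]
--         if i == 1:
--             new_lst[i-1] += p
--             new_lst[i+1] += p
--             continue
--         new_lst[1] += p
--     k -= 1
--     if k == 0:
--         max_prob = -1
--         for i in range(3):
--             if max_prob < new_lst[i]:
--                 max_idx = i
--                 max_prob = new_lst[i]
--         return max_idx
--     res = find(k, new_lst)
--     return res
-- ===== SOURCE B (Python) =====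
-- def find(k, prev_lst):
--     # Closed form: one step maps [a,b,c] to [b,a+c,b]; thereafter [x,y,x] -> [y,2x,y],
--     # so after k steps the comparison reduces to s=a+c vs b (odd k) or 2b vs s (even k);
--     # the doubling by positive powers of 2 never changes the argmax.
--     a, b, c = prev_lst[:3]
--     s = a + c
--     if k % 2 == 1:
--         return 1 if s > b else 0
--     return 1 if 2 * b > s else 0
-- ===== Notes on version B (the rewrite author's own statement) =====
-- stated objective: alternative
-- what changed: Replaced the k-deep recursion (apply the fixed 3-element transform k times, then argmax) by a closed form: the transform maps [a,b,c] to [b,a+c,b] and then [x,y,x] to [y,2x,y], so the argmax depends only on the parity of k — compare a+c vs b for odd k, 2b vs a+c for even k.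
import Mathlib
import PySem

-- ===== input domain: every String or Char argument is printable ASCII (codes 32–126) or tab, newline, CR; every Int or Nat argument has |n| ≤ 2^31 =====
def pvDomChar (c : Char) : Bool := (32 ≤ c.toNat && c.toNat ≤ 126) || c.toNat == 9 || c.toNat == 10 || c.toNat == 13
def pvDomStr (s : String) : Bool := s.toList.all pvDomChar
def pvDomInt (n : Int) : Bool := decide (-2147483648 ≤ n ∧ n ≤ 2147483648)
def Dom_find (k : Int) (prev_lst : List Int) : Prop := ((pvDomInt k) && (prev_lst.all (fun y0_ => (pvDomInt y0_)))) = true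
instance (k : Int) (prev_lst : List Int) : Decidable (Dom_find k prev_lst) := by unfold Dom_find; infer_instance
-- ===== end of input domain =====

-- B replaces A's k-step recursion by a parity-based closed form (alternative algorithm; no measured speed claim).

-- ===== PORT A =====
-- the 'for i in range(3)' loop building new_lst = [0,0,0] with in-place updates
def findA_new (l : List Int) : List Int :=
  (PySem.List.pyRange 0 3 1).foldl
    (fun new i =>
      let p := PySem.List.pyGetD l i 0  -- Python: prev_lst[i]; IndexError (excluded by Pre_) mapped to default
      if i == 1 then
        let new1 := new.set (i - 1).toNat (new.getD (i - 1).toNat 0 + p)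
        new1.set (i + 1).toNat (new1.getD (i + 1).toNat 0 + p)
      else new.set 1 (new.getD 1 0 + p))
    [0, 0, 0]

-- the 'max_prob = -1; for i in range(3): …' argmax loop; state = (max_prob, max_idx);
-- max_idx starts unbound in Python (UnboundLocalError excluded by Pre_), 0 is the stand-in
def findA_argmax (new : List Int) : Int :=
  ((PySem.List.pyRange 0 3 1).foldl
    (fun st i =>
      if st.1 < PySem.List.pyGetD new i 0 then (PySem.List.pyGetD new i 0, i) else st)
    (-1, 0)).2

def find (k : Int) (prev_lst : List Int) : Int :=
  let new_lst := findA_new prev_lst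
  if k - 1 = 0 then findA_argmax new_lst
  else if k - 1 < 0 then 0  -- totalization guard: Python recurses forever here (excluded by Pre_)
  else find (k - 1) new_lst
termination_by k.toNat
decreasing_by omega

-- ===== PORT B =====
def find_alt (k : Int) (prev_lst : List Int) : Int :=
  match PySem.List.slice prev_lst (some 0) (some 3) with
  | [a, b, c] =>
    let s := a + c
    if PySem.Int.mod k 2 = 1 then (if s > b then 1 else 0)
    else (if 2 * b > s then 1 else 0)
  | _ => 0  -- Python: unpacking raises ValueError (excluded by Pre_)

-- ===== PRECONDITION & SPEC =====
-- Pre_ excludes exactly the inputs where A raises: k ≤ 0 (unbounded recursion), lists shorter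
-- than 3 (IndexError), and lists whose 2nd element and 1st+3rd sum are both negative
-- (every entry of the final list is then negative and max_idx stays unbound: UnboundLocalError).
def Pre_find (k : Int) (prev_lst : List Int) : Prop :=
  1 ≤ k ∧ 3 ≤ prev_lst.length ∧
    ¬(prev_lst.getD 1 0 < 0 ∧ prev_lst.getD 0 0 + prev_lst.getD 2 0 < 0)
instance (k : Int) (prev_lst : List Int) : Decidable (Pre_find k prev_lst) := by
  unfold Pre_find; infer_instance
def pvWitness_find : Int × List Int := (3, [1, 5, 2])
def Spec_find (k : Int) (prev_lst : List Int) (out : Int) : Prop := out = find_alt k prev_lst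
instance (k : Int) (prev_lst : List Int) (out : Int) : Decidable (Spec_find k prev_lst out) := by unfold Spec_find; infer_instance

-- ===== CLAIM (what is proved, stated in full; the proofs are below) =====
def Claim_equal_find : Prop := ∀ (k : Int) (prev_lst : List Int), Dom_find k prev_lst → Pre_find k prev_lst → Spec_find k prev_lst (find k prev_lst)

-- ===== LEMMAS AND PROOFS =====
theorem findA_new_cons (a b c : Int) (t : List Int) :
    findA_new (a :: b :: c :: t) = [b, a + c, b] := by
  have h : PySem.List.pyRange 0 3 1 = [0, 1, 2] := by decide
  simp [findA_new, h, PySem.List.pyGetD_ofNat', List.set]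

theorem findA_argmax_sym (x y : Int) (h : ¬(x < 0 ∧ y < 0)) :
    findA_argmax [x, y, x] = if y > x then 1 else 0 := by
  have hr : PySem.List.pyRange 0 3 1 = [0, 1, 2] := by decide
  simp [findA_argmax, hr, PySem.List.pyGetD_ofNat']
  split_ifs <;> omega

-- after the first step the state has the shape [x, y, x]; each further step maps it to [y, 2x, y]
theorem find_sym (n : ℕ) : ∀ (k x y : Int), k.toNat = n → 1 ≤ k → ¬(x < 0 ∧ y < 0) →
    find k [x, y, x] =
      if k % 2 = 1 then (if 2 * x > y then 1 else 0) else (if y > x then 1 else 0) := by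
  induction n using Nat.strong_induction_on with
  | _ n ih =>
    intro k x y hn hk hneg
    rw [find]
    have hstep : findA_new [x, y, x] = [y, x + x, y] := findA_new_cons x y x []
    by_cases h1 : k - 1 = 0
    · have hk1 : k = 1 := by omega
      subst hk1
      simp only [hstep]
      rw [findA_argmax_sym y (x + x) (by omega)]
      norm_num
      split_ifs <;> omega
    · have h2 : ¬(k - 1 < 0) := by omega
      simp only [h1, h2, if_false, hstep]
      rw [ih (k - 1).toNat (by omega) (k - 1) y (x + x) rfl (by omega) (by omega)]
      have hpar : (k - 1) % 2 = 1 ↔ ¬(k % 2 = 1) := by omega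
      by_cases hp : k % 2 = 1
      · simp only [if_neg (by omega : ¬(k - 1) % 2 = 1), if_pos hp]
        split_ifs <;> omega
      · simp only [if_pos (hpar.mpr hp), if_neg hp]
        split_ifs <;> omega

theorem find_spec_aux (k : Int) (l : List Int) (hpre : Pre_find k l) :
    find k l = find_alt k l := by
  obtain ⟨hk, hlen, hneg⟩ := hpre
  obtain ⟨a, b, c, t, rfl⟩ : ∃ a b c t, l = a :: b :: c :: t := by
    match l with
    | a :: b :: c :: t => exact ⟨a, b, c, t, rfl⟩
    | [] | [_] | [_, _] => simp at hlen
  have hneg' : ¬(b < 0 ∧ a + c < 0) := by simpa using hneg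
  have halt : find_alt k (a :: b :: c :: t) =
      if k % 2 = 1 then (if a + c > b then 1 else 0) else (if 2 * b > a + c then 1 else 0) := by
    have hsl : PySem.List.slice (a :: b :: c :: t) (some 0) (some 3) = [a, b, c] := by
      simp [PySem.List.slice, PySem.List.clampIdx]
    have hm : PySem.Int.mod k 2 = k % 2 := PySem.Int.mod_eq_emod_of_pos (by norm_num)
    simp only [find_alt, hsl, hm]
  rw [halt, find]
  have hstep : findA_new (a :: b :: c :: t) = [b, a + c, b] := findA_new_cons a b c t
  by_cases h1 : k - 1 = 0
  · have hk1 : k = 1 := by omega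
    subst hk1
    simp only [hstep]
    rw [findA_argmax_sym b (a + c) hneg']
    norm_num
  · have h2 : ¬(k - 1 < 0) := by omega
    simp only [h1, h2, if_false, hstep]
    rw [find_sym (k - 1).toNat (k - 1) b (a + c) rfl (by omega) hneg']
    by_cases hp : k % 2 = 1
    · simp only [if_neg (by omega : ¬(k - 1) % 2 = 1), if_pos hp]
    · simp only [if_pos (by omega : (k - 1) % 2 = 1), if_neg hp]

-- ===== VERDICT (by name: the statement is the Claim_ definition above) =====
theorem find_spec : Claim_equal_find := by
  intro k l _ hpre
  exact find_spec_aux k l hpre
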